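-- pv_equiv track=rewrite | github.com/TheHappyBee/USACP | socdist1.py | find_smallest_interior_gap
-- ===== SOURCE A (Python) =====
-- def find_smallest_interior_gap(s):
--     smallest_gap = 1000000000
--     current_start = -1
--     N = len(s)
--     for i in range(N):
--         if (s[i] == '1'):
--             if (current_start != -1) and (i - current_start < smallest_gap):
--                 smallest_gap = i - current_start
--             current_start = i
--     return smallest_gap
-- ===== SOURCE B (Python) =====
-- def find_smallest_interior_gap(s):
--     # Split on '1': each interior piece of s.split('1') is the text strictly
--     # between two consecutive '1's, so its length + 1 is that gap.
--     parts = s.split('1')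
--     return min([1000000000] + [len(p) + 1 for p in parts[1:-1]])
-- ===== Notes on version B (the rewrite author's own statement) =====
-- stated objective: alternative
-- what changed: Instead of scanning characters while tracking the previous '1' index and a running minimum, B splits the string on '1' and takes the minimum of (length+1) over the interior pieces of the split (each interior piece is exactly the text between two consecutive '1's), with the 1000000000 sentinel seeding the min.
import Mathlib
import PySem

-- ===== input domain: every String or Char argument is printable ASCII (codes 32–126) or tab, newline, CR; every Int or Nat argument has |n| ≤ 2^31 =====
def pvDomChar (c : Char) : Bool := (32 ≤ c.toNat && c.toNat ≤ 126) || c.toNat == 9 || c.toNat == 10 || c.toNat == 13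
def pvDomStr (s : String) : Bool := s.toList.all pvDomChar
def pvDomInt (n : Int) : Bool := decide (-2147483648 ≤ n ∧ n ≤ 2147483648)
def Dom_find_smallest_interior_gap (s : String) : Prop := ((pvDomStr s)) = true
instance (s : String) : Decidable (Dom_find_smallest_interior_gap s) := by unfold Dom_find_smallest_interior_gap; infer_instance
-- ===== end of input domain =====

-- B replaces A's prev-index/min-tracking character scan by splitting the string on '1'
-- and minimizing (length + 1) over the interior pieces of the split; objective: alternative.

-- ===== PORT A =====
-- the 'for i in range(N): if s[i] == '1': …' loop, scanning the characters in order with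
-- state (smallest_gap, current_start); i is the running index
def findA_loop : List Char → Int → Int → Int → Int
  | [], _, smallest_gap, _ => smallest_gap
  | x :: xs, i, smallest_gap, current_start =>
    if x = '1' then
      findA_loop xs (i + 1)
        (if current_start ≠ -1 ∧ i - current_start < smallest_gap then i - current_start
         else smallest_gap)
        i
    else
      findA_loop xs (i + 1) smallest_gap current_start

def find_smallest_interior_gap (s : String) : Int :=
  findA_loop s.toList 0 1000000000 (-1)

-- ===== PORT B =====
-- parts = s.split('1'): the separator is the nonempty literal "1", so this is
-- PySem.Chars.splitOn on the code points (PySem.Str.split? returns exactly some of it)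
def find_smallest_interior_gap_alt (s : String) : Int :=
  let parts := PySem.Chars.splitOn s.toList ['1']
  -- [len(p) + 1 for p in parts[1:-1]]
  let gaps := (PySem.List.slice parts (some 1) (some (-1))).map (fun p => (p.length : Int) + 1)
  -- min([1000000000] + gaps): min over a nonempty list never raises, so getD 0 is never taken
  (PySem.List.min? ((1000000000 : Int) :: gaps) (fun x => x)).getD 0

-- ===== PRECONDITION & SPEC =====
def Spec_find_smallest_interior_gap (s : String) (out : Int) : Prop := out = find_smallest_interior_gap_alt s
instance (s : String) (out : Int) : Decidable (Spec_find_smallest_interior_gap s out) := by unfold Spec_find_smallest_interior_gap; infer_instance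

-- ===== CLAIM (what is proved, stated in full; the proofs are below) =====
def Claim_equal_find_smallest_interior_gap : Prop := ∀ (s : String), Dom_find_smallest_interior_gap s → Spec_find_smallest_interior_gap s (find_smallest_interior_gap s)

-- ===== LEMMAS AND PROOFS =====

-- the positions of the '1' characters, starting the count at i
def onesIdx (cs : List Char) (i : Int) : List Int :=
  (PySem.List.enumerate cs i).filterMap (fun p => if p.2 = '1' then some p.1 else none)

-- A's loop, replayed over the list of '1'-positions only
def goP : List Int → Int → Int → Int
  | [], g, _ => g
  | p :: ps, g, c => goP ps (if c ≠ -1 ∧ p - c < g then p - c else g) p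

-- consecutive differences of a position list headed by p
def diffsP : Int → List Int → List Int
  | _, [] => []
  | p, q :: ps => (q - p) :: diffsP q ps

-- structural recursion equal to PySem.Chars.splitOn · ['1']
def split1 : List Char → List (List Char)
  | [] => [[]]
  | c :: rest => if c = '1' then [] :: split1 rest else (split1 rest).modifyHead (c :: ·)

-- the gap list read off the dropLast of a split, with the FIRST gap measured from
-- distance d back to the previous '1' (or the virtual start)
def headGaps (d : Int) : List (List Char) → List Int
  | [] => []
  | seg :: rest => ((seg.length : Int) + d) :: rest.map (fun t => (t.length : Int) + 1)

theorem split1_ne_nil (cs : List Char) : split1 cs ≠ [] := by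
  induction cs with
  | nil => simp [split1]
  | cons c rest ih =>
    simp only [split1]
    split_ifs
    · simp
    · cases h : split1 rest with
      | nil => exact absurd h ih
      | cons hh t => simp [List.modifyHead]

theorem findA_loop_eq_goP (cs : List Char) (i g c : Int) :
    findA_loop cs i g c = goP (onesIdx cs i) g c := by
  induction cs generalizing i g c with
  | nil => simp [findA_loop, onesIdx, PySem.List.enumerate_nil, goP]
  | cons x xs ih =>
    simp only [findA_loop, onesIdx, PySem.List.enumerate_cons, List.filterMap_cons]
    by_cases hx : x = '1' <;> simp [hx, goP, ih, onesIdx]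

theorem onesIdx_ge (cs : List Char) (i : Int) : ∀ q ∈ onesIdx cs i, i ≤ q := by
  intro q hq
  simp only [onesIdx, List.mem_filterMap] at hq
  obtain ⟨p, hp, hfe⟩ := hq
  rw [PySem.List.mem_enumerate_iff] at hp
  obtain ⟨k, hk, rfl⟩ := hp
  by_cases h1 : (cs[k] : Char) = '1' <;> simp [h1] at hfe
  omega

theorem goP_eq_foldl (ps : List Int) (p g : Int) (hp : 0 ≤ p)
    (hps : ∀ q ∈ ps, 0 ≤ q) :
    goP ps g p = (diffsP p ps).foldl min g := by
  induction ps generalizing p g with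
  | nil => simp [goP, diffsP]
  | cons q rest ih =>
    have hq : (0:Int) ≤ q := hps q (by simp)
    have hcond : (if p ≠ -1 ∧ q - p < g then q - p else g) = min g (q - p) := by
      have : p ≠ -1 := by omega
      simp only [this, ne_eq, not_false_eq_true, true_and]
      rw [min_def]; split_ifs <;> omega
    simp only [goP, diffsP, List.foldl_cons, hcond]
    exact ih q (min g (q - p)) hq (fun r hr => hps r (by simp [hr]))

-- splitOn's fuelled worker, characterized through split1
theorem go_eq_split1 (fuel : Nat) (l cur : List Char) (acc : List (List Char))
    (h : l.length < fuel) :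
    PySem.Chars.splitOn.go ['1'] fuel l cur acc
      = acc.reverse ++ (split1 l).modifyHead (cur.reverse ++ ·) := by
  induction fuel generalizing l cur acc with
  | zero => omega
  | succ f ih =>
    cases l with
    | nil =>
      rw [PySem.Chars.splitOn.go.eq_def]
      simp [split1, List.modifyHead]
    | cons c rest =>
      rw [PySem.Chars.splitOn.go.eq_def]
      simp only [List.isPrefixOf]
      by_cases hc : c = '1'
      · have hb : ('1' == c && true) = true := by simp [hc]
        rw [if_pos hb]
        rw [ih _ _ _ (by simp at h ⊢; omega)]
        subst hc
        have hsp : split1 ('1' :: rest) = [] :: split1 rest := by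
          rw [split1]; simp
        obtain ⟨hh, t, hht⟩ : ∃ hh t, split1 rest = hh :: t := by
          cases hs : split1 rest with
          | nil => exact absurd hs (split1_ne_nil rest)
          | cons hh t => exact ⟨hh, t, rfl⟩
        rw [hsp, hht]
        simp [hht]
      · have hb : ¬ (('1' == c && true) = true) := by
          simp only [Bool.and_true, beq_iff_eq]
          exact fun h' => hc h'.symm
        rw [if_neg hb]
        rw [ih _ _ _ (by simp at h ⊢; omega)]
        have hsp : split1 (c :: rest) = (split1 rest).modifyHead (c :: ·) := by
          rw [split1]; simp [hc]
        obtain ⟨hh, t, hht⟩ : ∃ hh t, split1 rest = hh :: t := by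
          cases hs : split1 rest with
          | nil => exact absurd hs (split1_ne_nil rest)
          | cons hh t => exact ⟨hh, t, rfl⟩
        rw [hsp, hht]
        simp

theorem splitOn_eq_split1 (cs : List Char) :
    PySem.Chars.splitOn cs ['1'] = split1 cs := by
  unfold PySem.Chars.splitOn
  rw [go_eq_split1 _ _ _ _ (by omega)]
  cases split1 cs <;> simp [List.modifyHead]

theorem slice_one_neg_one {α : Type} (xs : List α) :
    PySem.List.slice xs (some 1) (some (-1)) = xs.tail.dropLast := by
  simp only [PySem.List.slice, PySem.List.clampIdx]
  cases xs with
  | nil => simp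
  | cons x t =>
    rw [if_neg (by omega : ¬ ((1:Int) < 0)), if_pos (by omega : ((-1:Int) < 0))]
    rw [if_neg (show ¬ (((x::t).length : Int) + (-1) < 0) by
      simp only [List.length_cons]; omega)]
    have h1 : min (1:Int).toNat (x::t).length = 1 := by simp
    have h2 : (((x::t).length : Int) + (-1)).toNat = t.length := by
      simp only [List.length_cons]; omega
    rw [h1, h2]
    simp [List.dropLast_eq_take]

theorem headGaps_one (l : List (List Char)) :
    headGaps 1 l = l.map (fun t => (t.length : Int) + 1) := by
  cases l <;> simp [headGaps]

theorem diffsP_eq_headGaps (cs : List Char) (i c : Int) :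
    diffsP c (onesIdx cs i) = headGaps (i - c) ((split1 cs).dropLast) := by
  induction cs generalizing i c with
  | nil => simp [onesIdx, PySem.List.enumerate_nil, diffsP, split1, headGaps]
  | cons x xs ih =>
    by_cases hx : x = '1'
    · have hones : onesIdx (x :: xs) i = i :: onesIdx xs (i + 1) := by
        simp [onesIdx, PySem.List.enumerate_cons, hx]
      rw [hones]
      simp only [diffsP, ih (i + 1) i]
      have : (i + 1) - i = (1 : Int) := by ring
      rw [this, headGaps_one]
      obtain ⟨h, t, hht⟩ : ∃ h t, split1 xs = h :: t := by
        cases hs : split1 xs with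
        | nil => exact absurd hs (split1_ne_nil xs)
        | cons h t => exact ⟨h, t, rfl⟩
      simp [split1, hx, hht, headGaps]
    · have hones : onesIdx (x :: xs) i = onesIdx xs (i + 1) := by
        simp [onesIdx, PySem.List.enumerate_cons, hx]
      rw [hones, ih (i + 1) c]
      obtain ⟨h, t, hht⟩ : ∃ h t, split1 xs = h :: t := by
        cases hs : split1 xs with
        | nil => exact absurd hs (split1_ne_nil xs)
        | cons h t => exact ⟨h, t, rfl⟩
      simp only [split1, if_neg hx, hht, List.modifyHead]
      cases t with
      | nil => simp [headGaps]
      | cons t0 ts =>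
        simp only [List.dropLast_cons₂, headGaps, List.length_cons]
        congr 1
        push_cast
        ring

theorem onesIdx_nil_tail (cs : List Char) (i : Int) (h : onesIdx cs i = []) :
    (split1 cs).tail = [] := by
  induction cs generalizing i with
  | nil => simp [split1]
  | cons x xs ih =>
    by_cases hx : x = '1'
    · exfalso
      have : onesIdx (x :: xs) i = i :: onesIdx xs (i + 1) := by
        simp [onesIdx, PySem.List.enumerate_cons, hx]
      rw [this] at h; exact List.cons_ne_nil _ _ h
    · have hones : onesIdx (x :: xs) i = onesIdx xs (i + 1) := by
        simp [onesIdx, PySem.List.enumerate_cons, hx]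
      rw [hones] at h
      have := ih (i + 1) h
      obtain ⟨hh, t, hht⟩ : ∃ hh t, split1 xs = hh :: t := by
        cases hs : split1 xs with
        | nil => exact absurd hs (split1_ne_nil xs)
        | cons hh t => exact ⟨hh, t, rfl⟩
      rw [hht] at this
      simp only [List.tail_cons] at this
      simp [split1, hx, hht, List.modifyHead, this]

theorem onesIdx_cons_gaps (cs : List Char) (i p : Int) (ps : List Int)
    (h : onesIdx cs i = p :: ps) :
    diffsP p ps = ((split1 cs).tail.dropLast).map (fun t => (t.length : Int) + 1) := by
  induction cs generalizing i p ps with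
  | nil => simp [onesIdx, PySem.List.enumerate_nil] at h
  | cons x xs ih =>
    by_cases hx : x = '1'
    · have hones : onesIdx (x :: xs) i = i :: onesIdx xs (i + 1) := by
        simp [onesIdx, PySem.List.enumerate_cons, hx]
      rw [hones] at h
      have he : i = p := (List.cons_eq_cons.mp h).1
      have hps : onesIdx xs (i + 1) = ps := (List.cons_eq_cons.mp h).2
      subst he
      rw [← hps, diffsP_eq_headGaps xs (i + 1) i]
      have : (i + 1) - i = (1 : Int) := by ring
      rw [this, headGaps_one]
      simp [split1, hx]
    · have hones : onesIdx (x :: xs) i = onesIdx xs (i + 1) := by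
        simp [onesIdx, PySem.List.enumerate_cons, hx]
      rw [hones] at h
      rw [ih (i + 1) p ps h]
      obtain ⟨hh, t, hht⟩ : ∃ hh t, split1 xs = hh :: t := by
        cases hs : split1 xs with
        | nil => exact absurd hs (split1_ne_nil xs)
        | cons hh t => exact ⟨hh, t, rfl⟩
      simp [split1, hx, hht, List.modifyHead]

-- ===== VERDICT (by name: the statement is the Claim_ definition above) =====
theorem find_smallest_interior_gap_spec : Claim_equal_find_smallest_interior_gap := by
  intro s _
  unfold Spec_find_smallest_interior_gap find_smallest_interior_gap find_smallest_interior_gap_alt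
  rw [findA_loop_eq_goP]
  simp only [splitOn_eq_split1, slice_one_neg_one]
  cases hps : onesIdx s.toList 0 with
  | nil =>
    rw [onesIdx_nil_tail s.toList 0 hps]
    simp [goP, PySem.List.min?]
  | cons p rest =>
    have hall : ∀ q ∈ onesIdx s.toList 0, (0:Int) ≤ q := onesIdx_ge s.toList 0
    rw [hps] at hall
    have hp0 : (0:Int) ≤ p := hall p (by simp)
    have step : goP (p :: rest) 1000000000 (-1) = goP rest 1000000000 p := by
      simp [goP]
    rw [step, goP_eq_foldl rest p 1000000000 hp0 (fun q hq => hall q (by simp [hq]))]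
    rw [onesIdx_cons_gaps s.toList 0 p rest hps]
    simp only [PySem.List.min?_id_cons, Option.getD_some]
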